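-- pv_equiv track=rewrite | github.com/elyssaolivares/CCCS_106_FINAL_PROJECT | app/views/dashboard/admin/dashboard_data_manager.py | calculate_status_counts
-- ===== SOURCE A (Python) =====
-- class StatusNormalizer:
--     @staticmethod
--     def normalize(status_string):
--         return (status_string or "").strip().lower().replace("-", " ").replace("_", " ")
--
--     @staticmethod
--     def canonicalize(status_string):
--         """Convert any status string to canonical Title Case format"""
--         normalized = StatusNormalizer.normalize(status_string)
--         if "pending" in normalized:
--             return "Pending"
--         elif "in progress" in normalized or "on going" in normalized or "ongoing" in normalized:
--             return "In Progress"
--         elif "fixed" in normalized or "resolved" in normalized: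
--             return "Resolved"
--         elif "reject" in normalized or "rejected" in normalized:
--             return "Rejected"
--         return "Pending"
--
--     @staticmethod
--     def match_status(status_a, status_b):
--         """Case-insensitive status comparison"""
--         return StatusNormalizer.normalize(status_a) == StatusNormalizer.normalize(status_b.lower())
--
-- def calculate_status_counts(reports):
--     counts = {
--         "pending": 0,
--         "in progress": 0,
--         "resolved": 0,
--         "rejected": 0
--     }
--     for report in reports:
--         normalized = StatusNormalizer.normalize(report.get('status'))
--         if "pending" in normalized:
--             counts["pending"] += 1
--
--         elif "in progress" in normalized or "on going" in normalized or "ongoing" in normalized: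
--             counts["in progress"] += 1
--         elif "fixed" in normalized or "resolved" in normalized:
--             counts["resolved"] += 1
--         elif "reject" in normalized or "rejected" in normalized:
--             counts["rejected"] += 1
--     return counts
-- ===== SOURCE B (Python) =====
-- RULES = [
--     ("pending", ("pending",)),
--     ("in progress", ("in progress", "on going", "ongoing")),
--     ("resolved", ("fixed", "resolved")),
--     ("rejected", ("reject",)),
-- ]
--
-- def _normalize(status_string):
--     return (status_string or "").strip().lower().replace("-", " ").replace("_", " ")
--
-- def _matches(keywords, s):
--     return any(kw in s for kw in keywords)
--
-- def calculate_status_counts(reports):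
--     # Staged passes: normalize everything once, then for each category in priority
--     # order count the matching statuses and drop them from the remaining pool, so
--     # later categories never see statuses already claimed by an earlier one.
--     remaining = [_normalize(report.get('status')) for report in reports]
--     counts = {}
--     for key, keywords in RULES:
--         matched = [s for s in remaining if _matches(keywords, s)]
--         remaining = [s for s in remaining if not _matches(keywords, s)]
--         counts[key] = len(matched)
--     return counts
-- ===== Notes on version B (the rewrite author's own statement) =====
-- stated objective: alternative
-- what changed: Instead of classifying each report in one pass through an if/elif cascade, B normalizes all statuses up front and then makes one filtering pass per category in priority order, counting the matches and removing them from the remaining pool (folding the redundant 'reject'/'rejected' keyword pair into one).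
import Mathlib
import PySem

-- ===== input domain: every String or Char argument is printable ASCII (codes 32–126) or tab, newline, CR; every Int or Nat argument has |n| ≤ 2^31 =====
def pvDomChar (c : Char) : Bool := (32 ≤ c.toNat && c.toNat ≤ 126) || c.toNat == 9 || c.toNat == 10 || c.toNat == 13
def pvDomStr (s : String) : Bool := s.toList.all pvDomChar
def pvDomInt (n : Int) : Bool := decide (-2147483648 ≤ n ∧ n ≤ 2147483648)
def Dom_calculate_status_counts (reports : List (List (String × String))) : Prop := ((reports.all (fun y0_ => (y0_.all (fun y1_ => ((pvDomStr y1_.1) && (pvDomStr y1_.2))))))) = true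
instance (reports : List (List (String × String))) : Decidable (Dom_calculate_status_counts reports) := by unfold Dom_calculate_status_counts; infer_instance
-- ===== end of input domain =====

-- B replaces A's single classifying pass with an if/elif cascade by staged filtering
-- passes: normalize all statuses once, then one counting-and-removing pass per category
-- in priority order (objective: alternative); return values are proved identical.

-- ===== PORT A =====
-- StatusNormalizer.normalize; `status_string or ""` on the Option String from
-- report.get('status') is rendered as Option.getD "" at the call site (exact: None → "",
-- and "" or "" is "" as well).
def pvNormalize (s : String) : String :=
  PySem.Str.replace (PySem.Str.replace (PySem.Str.lower (PySem.Str.strip s)) "-" " ") "_" " "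

def calculate_status_counts (reports : List (List (String × String))) : List (String × Int) :=
  let counts0 : PySem.Dict String Int :=
    PySem.Dict.mk [("pending", 0), ("in progress", 0), ("resolved", 0), ("rejected", 0)]
  (reports.foldl (fun counts report =>
      let normalized := pvNormalize (((PySem.Dict.mk report).get? "status").getD "")
      if PySem.Str.isIn "pending" normalized then
        counts.modify "pending" 0 (· + 1)
      else if PySem.Str.isIn "in progress" normalized || PySem.Str.isIn "on going" normalized
              || PySem.Str.isIn "ongoing" normalized then
        counts.modify "in progress" 0 (· + 1)
      else if PySem.Str.isIn "fixed" normalized || PySem.Str.isIn "resolved" normalized then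
        counts.modify "resolved" 0 (· + 1)
      else if PySem.Str.isIn "reject" normalized || PySem.Str.isIn "rejected" normalized then
        counts.modify "rejected" 0 (· + 1)
      else counts) counts0).items

-- ===== PORT B =====
def pvRules : List (String × List String) :=
  [("pending", ["pending"]),
   ("in progress", ["in progress", "on going", "ongoing"]),
   ("resolved", ["fixed", "resolved"]),
   ("rejected", ["reject"])]

def pvMatches (keywords : List String) (s : String) : Bool :=
  keywords.any (fun kw => PySem.Str.isIn kw s)

def calculate_status_counts_alt (reports : List (List (String × String))) : List (String × Int) :=
  let remaining0 : List String :=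
    reports.map (fun report => pvNormalize (((PySem.Dict.mk report).get? "status").getD ""))
  -- for key, keywords in RULES: count the matches, drop them from the pool, record the count
  (pvRules.foldl (fun (st : PySem.Dict String Int × List String) r =>
      let matched := st.2.filter (fun s => pvMatches r.2 s)
      let remaining := st.2.filter (fun s => !pvMatches r.2 s)
      (st.1.insert r.1 (matched.length : Int), remaining))
    (PySem.Dict.empty, remaining0)).1.items

-- ===== PRECONDITION & SPEC =====
def Spec_calculate_status_counts (reports : List (List (String × String))) (out : List (String × Int)) : Prop := out = calculate_status_counts_alt reports
instance (reports : List (List (String × String))) (out : List (String × Int)) : Decidable (Spec_calculate_status_counts reports out) := by unfold Spec_calculate_status_counts; infer_instance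

-- ===== CLAIM (what is proved, stated in full; the proofs are below) =====
def Claim_equal_calculate_status_counts : Prop := ∀ (reports : List (List (String × String))), Dom_calculate_status_counts reports → Spec_calculate_status_counts reports (calculate_status_counts reports)

-- ===== LEMMAS AND PROOFS =====

-- category predicates on an already-normalized status string
def pvP (n : String) : Bool := PySem.Str.isIn "pending" n
def pvQ (n : String) : Bool :=
  PySem.Str.isIn "in progress" n || (PySem.Str.isIn "on going" n || PySem.Str.isIn "ongoing" n)
def pvR (n : String) : Bool := PySem.Str.isIn "fixed" n || PySem.Str.isIn "resolved" n
def pvS (n : String) : Bool := PySem.Str.isIn "reject" n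

-- A's loop body as a function of the normalized status
def pvStepA (counts : PySem.Dict String Int) (n : String) : PySem.Dict String Int :=
  if pvP n then counts.modify "pending" 0 (· + 1)
  else if pvQ n then counts.modify "in progress" 0 (· + 1)
  else if pvR n then counts.modify "resolved" 0 (· + 1)
  else if pvS n then counts.modify "rejected" 0 (· + 1)
  else counts

-- "rejected" occurring in a string implies "reject" does, so A's redundant
-- `or "rejected" in normalized` never decides a branch.
theorem isIn_reject_of_rejected (n : String) :
    PySem.Str.isIn "rejected" n = true → PySem.Str.isIn "reject" n = true := by
  simp only [PySem.Str.isIn_iff_infix]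
  intro h
  refine List.IsInfix.trans ?_ h
  decide

theorem reject_or_rejected (n : String) :
    (PySem.Str.isIn "reject" n || PySem.Str.isIn "rejected" n) = pvS n := by
  unfold pvS
  cases hr : PySem.Str.isIn "rejected" n
  · rw [Bool.or_false]
  · rw [isIn_reject_of_rejected n hr, Bool.true_or]

-- A's fold over the normalized statuses, with the four counters generalized:
-- each final counter is its start value plus the count of statuses its branch claims.
theorem A_fold_items (ns : List String) (a b c d : Int) :
    ((ns.foldl pvStepA
      (PySem.Dict.mk [("pending", a), ("in progress", b), ("resolved", c), ("rejected", d)])).items)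
    = [("pending", a + ns.countP pvP),
       ("in progress", b + ns.countP (fun n => pvQ n && !pvP n)),
       ("resolved", c + ns.countP (fun n => pvR n && (!pvQ n && !pvP n))),
       ("rejected", d + ns.countP (fun n => pvS n && (!pvR n && (!pvQ n && !pvP n))))] := by
  induction ns generalizing a b c d with
  | nil => simp
  | cons n ns ih =>
    simp only [List.foldl_cons, List.countP_cons]
    cases h1 : pvP n with
    | true =>
      have hm : pvStepA (PySem.Dict.mk [("pending", a), ("in progress", b), ("resolved", c), ("rejected", d)]) n
          = PySem.Dict.mk [("pending", a + 1), ("in progress", b), ("resolved", c), ("rejected", d)] := by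
        unfold pvStepA; rw [h1]; rfl
      rw [hm, ih]; simp; omega
    | false =>
      cases h2 : pvQ n with
      | true =>
        have hm : pvStepA (PySem.Dict.mk [("pending", a), ("in progress", b), ("resolved", c), ("rejected", d)]) n
            = PySem.Dict.mk [("pending", a), ("in progress", b + 1), ("resolved", c), ("rejected", d)] := by
          unfold pvStepA; rw [h1, h2]; rfl
        rw [hm, ih]; simp; omega
      | false =>
        cases h3 : pvR n with
        | true =>
          have hm : pvStepA (PySem.Dict.mk [("pending", a), ("in progress", b), ("resolved", c), ("rejected", d)]) n
              = PySem.Dict.mk [("pending", a), ("in progress", b), ("resolved", c + 1), ("rejected", d)] := by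
            unfold pvStepA; rw [h1, h2, h3]; rfl
          rw [hm, ih]; simp; omega
        | false =>
          cases h4 : pvS n with
          | true =>
            have hm : pvStepA (PySem.Dict.mk [("pending", a), ("in progress", b), ("resolved", c), ("rejected", d)]) n
                = PySem.Dict.mk [("pending", a), ("in progress", b), ("resolved", c), ("rejected", d + 1)] := by
              unfold pvStepA; rw [h1, h2, h3, h4]; rfl
            rw [hm, ih]; simp; omega
          | false =>
            have hm : pvStepA (PySem.Dict.mk [("pending", a), ("in progress", b), ("resolved", c), ("rejected", d)]) n
                = PySem.Dict.mk [("pending", a), ("in progress", b), ("resolved", c), ("rejected", d)] := by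
              unfold pvStepA; rw [h1, h2, h3, h4]; rfl
            rw [hm, ih]; simp

-- B's four staged filter passes, evaluated: the same four first-match counts.
theorem B_fold_items (ns : List String) :
    (pvRules.foldl (fun (st : PySem.Dict String Int × List String) r =>
        let matched := st.2.filter (fun s => pvMatches r.2 s)
        let remaining := st.2.filter (fun s => !pvMatches r.2 s)
        (st.1.insert r.1 (matched.length : Int), remaining))
      (PySem.Dict.empty, ns)).1.items
    = [("pending", (ns.countP pvP : Int)),
       ("in progress", (ns.countP (fun n => pvQ n && !pvP n) : Int)),
       ("resolved", (ns.countP (fun n => pvR n && (!pvQ n && !pvP n)) : Int)),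
       ("rejected", (ns.countP (fun n => pvS n && (!pvR n && (!pvQ n && !pvP n))) : Int))] := by
  simp only [pvRules, List.foldl_cons, List.foldl_nil, pvMatches, List.any_cons, List.any_nil,
    Bool.or_false, List.filter_filter, List.countP_eq_length_filter]
  rfl

-- ===== VERDICT (by name: the statement is the Claim_ definition above) =====
theorem calculate_status_counts_spec : Claim_equal_calculate_status_counts := by
  intro reports _
  show calculate_status_counts reports = calculate_status_counts_alt reports
  simp only [calculate_status_counts, calculate_status_counts_alt]
  have hA : (reports.foldl (fun (counts : PySem.Dict String Int) report =>
      let normalized := pvNormalize (((PySem.Dict.mk report).get? "status").getD "")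
      if PySem.Str.isIn "pending" normalized then counts.modify "pending" 0 (· + 1)
      else if PySem.Str.isIn "in progress" normalized || PySem.Str.isIn "on going" normalized
              || PySem.Str.isIn "ongoing" normalized then counts.modify "in progress" 0 (· + 1)
      else if PySem.Str.isIn "fixed" normalized || PySem.Str.isIn "resolved" normalized then
        counts.modify "resolved" 0 (· + 1)
      else if PySem.Str.isIn "reject" normalized || PySem.Str.isIn "rejected" normalized then
        counts.modify "rejected" 0 (· + 1)
      else counts)
      (PySem.Dict.mk [("pending", 0), ("in progress", 0), ("resolved", 0), ("rejected", 0)]))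
      = ((reports.map (fun report => pvNormalize (((PySem.Dict.mk report).get? "status").getD ""))).foldl
          pvStepA
          (PySem.Dict.mk [("pending", 0), ("in progress", 0), ("resolved", 0), ("rejected", 0)])) := by
    have hfun : (fun (counts : PySem.Dict String Int) (report : List (String × String)) =>
        let normalized := pvNormalize (((PySem.Dict.mk report).get? "status").getD "")
        if PySem.Str.isIn "pending" normalized then counts.modify "pending" 0 (· + 1)
        else if PySem.Str.isIn "in progress" normalized || PySem.Str.isIn "on going" normalized
                || PySem.Str.isIn "ongoing" normalized then counts.modify "in progress" 0 (· + 1)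
        else if PySem.Str.isIn "fixed" normalized || PySem.Str.isIn "resolved" normalized then
          counts.modify "resolved" 0 (· + 1)
        else if PySem.Str.isIn "reject" normalized || PySem.Str.isIn "rejected" normalized then
          counts.modify "rejected" 0 (· + 1)
        else counts)
        = (fun (counts : PySem.Dict String Int) (report : List (String × String)) =>
            pvStepA counts (pvNormalize (((PySem.Dict.mk report).get? "status").getD ""))) := by
      funext counts report
      simp only [pvStepA, pvP, pvQ, pvR, ← reject_or_rejected, Bool.or_assoc]
    rw [List.foldl_map, hfun]
  rw [hA, A_fold_items, B_fold_items]
  simp
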